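-- pv_equiv track=rewrite | github.com/IFIR649/pixelart-forge-IA | pixelforge_ops.py | op_smooth
-- ===== SOURCE A (Python) =====
-- def clone_rows(rows: list[list[str | None]]) -> list[list[str | None]]:
--     return [row[:] for row in rows]
--
-- def in_bounds(rows: list[list[str | None]], x: int, y: int) -> bool:
--     return 0 <= y < len(rows) and 0 <= x < len(rows[y])
--
-- def neighbors(rows: list[list[str | None]], x: int, y: int, diagonals: bool = True) -> list[str]:
--     dirs = [(-1, 0), (1, 0), (0, -1), (0, 1)]
--     if diagonals:
--         dirs += [(-1, -1), (1, -1), (-1, 1), (1, 1)]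
--     out: list[str] = []
--     for dx, dy in dirs:
--         nx, ny = x + dx, y + dy
--         if in_bounds(rows, nx, ny) and rows[ny][nx]:
--             out.append(str(rows[ny][nx]))
--     return out
--
-- def majority(values: list[str]) -> tuple[str | None, int]:
--     counts: dict[str, int] = {}
--     for value in values:
--         counts[value] = counts.get(value, 0) + 1
--     if not counts:
--         return None, 0
--     color = max(counts, key=counts.get)
--     return color, counts[color]
--
-- def op_smooth(rows: list[list[str | None]], passes: int = 1) -> list[list[str | None]]:
--     current = clone_rows(rows)
--     passes = max(1, min(8, int(passes)))
--     for _ in range(passes):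
--         new_rows = clone_rows(current)
--         for y, row in enumerate(current):
--             for x, value in enumerate(row):
--                 near = neighbors(current, x, y, True)
--                 color, count = majority(near)
--                 if value is None and color and count >= 5:
--                     new_rows[y][x] = color
--                 elif value is not None and color and color != value and count >= 6:
--                     new_rows[y][x] = color
--                 elif value is not None and len(near) <= 1:
--                     new_rows[y][x] = None
--         current = new_rows
--     return current
-- ===== SOURCE B (Python) =====
-- def op_smooth(rows: list[list[str | None]], passes: int = 1) -> list[list[str | None]]:
--     cur = [list(r) for r in rows]
--     for _ in range(max(1, min(8, int(passes)))):
--         # scatter: every truthy cell deposits its color into the count bucket of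
--         # each in-bounds neighbor, and bumps that neighbor's truthy-neighbor tally
--         counts: dict[tuple[int, int], dict[str, int]] = {}
--         near: dict[tuple[int, int], int] = {}
--         for y, row in enumerate(cur):
--             for x, value in enumerate(row):
--                 if value:
--                     s = str(value)
--                     for dy in (-1, 0, 1):
--                         for dx in (-1, 0, 1):
--                             ny, nx = y + dy, x + dx
--                             if (dy or dx) and 0 <= ny < len(cur) and 0 <= nx < len(cur[ny]):
--                                 bucket = counts.get((nx, ny), {})
--                                 bucket[s] = bucket.get(s, 0) + 1
--                                 counts[(nx, ny)] = bucket
--                                 near[(nx, ny)] = near.get((nx, ny), 0) + 1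
--         # decide: apply the three rules per cell from its accumulated bucket
--         out = []
--         for y, row in enumerate(cur):
--             new_row = []
--             for x, value in enumerate(row):
--                 bucket = counts.get((x, y), {})
--                 n = near.get((x, y), 0)
--                 top = max(bucket.values(), default=0)
--                 if value is None:
--                     new_row.append(_top_color(bucket, top) if top >= 5 else None)
--                 elif top >= 6 and _top_color(bucket, top) != value:
--                     new_row.append(_top_color(bucket, top))
--                 elif n <= 1:
--                     new_row.append(None)
--                 else:
--                     new_row.append(value)
--             out.append(new_row)
--         cur = out
--     return cur
--
-- def _top_color(bucket: dict[str, int], top: int) -> str | None: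
--     for c, k in bucket.items():
--         if k == top:
--             return c
--     return None
-- ===== Notes on version B (the rewrite author's own statement) =====
-- stated objective: alternative
-- what changed: Inverts the traversal: instead of A's per-cell gather (each cell scans its 8 neighbors and builds a fresh majority dict), B makes one scatter pass in which every truthy cell deposits its color into position-keyed count buckets and neighbor tallies, then a separate decision loop applies the three rules per cell from its accumulated bucket.
import Mathlib
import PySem

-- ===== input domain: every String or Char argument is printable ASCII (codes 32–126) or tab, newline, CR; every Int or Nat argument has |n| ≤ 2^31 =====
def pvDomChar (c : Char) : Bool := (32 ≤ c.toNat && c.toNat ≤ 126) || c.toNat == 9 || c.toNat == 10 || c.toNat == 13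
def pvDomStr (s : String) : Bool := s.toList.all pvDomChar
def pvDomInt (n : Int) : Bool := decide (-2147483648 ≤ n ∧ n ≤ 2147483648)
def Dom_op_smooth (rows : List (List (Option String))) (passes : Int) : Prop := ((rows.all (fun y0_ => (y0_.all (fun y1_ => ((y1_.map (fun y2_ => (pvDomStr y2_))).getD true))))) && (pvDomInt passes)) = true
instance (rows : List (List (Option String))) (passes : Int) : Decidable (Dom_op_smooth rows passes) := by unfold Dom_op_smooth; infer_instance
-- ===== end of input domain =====

-- B inverts the traversal: one scatter pass deposits every truthy cell's color into
-- position-keyed count buckets and neighbor tallies, then a decision loop applies the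
-- three rules per cell from its accumulated bucket; A gathers the 8 neighbors per cell.

-- ===== PORT A =====

-- clone_rows: row[:] copies each row; under Lean's value semantics a copy is the row itself
def cloneRowsA (rows : List (List (Option String))) : List (List (Option String)) :=
  rows.map (fun row => row)

-- Python truthiness of a cell value (None and '' are falsy)
def pyTruthyA (v : Option String) : Bool :=
  match v with
  | none => false
  | some s => !(s == "")

-- in_bounds(rows, x, y)
def inBoundsA (rows : List (List (Option String))) (x y : Int) : Bool :=
  decide (0 ≤ y) && decide (y < (rows.length : Int)) &&
  decide (0 ≤ x) && decide (x < (((rows.getD y.toNat []).length : Int)))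

-- rows[ny][nx]; only read under inBoundsA, where both indices are nonnegative and in range
def cellA (rows : List (List (Option String))) (x y : Int) : Option String :=
  (rows.getD y.toNat []).getD x.toNat none

def dirsA : List (Int × Int) := [(-1,0),(1,0),(0,-1),(0,1),(-1,-1),(1,-1),(-1,1),(1,1)]

-- neighbors(rows, x, y, True); str(s) of a str is s itself (the guard ensures the cell is `some`)
def neighborsA (rows : List (List (Option String))) (x y : Int) : List String :=
  dirsA.foldl (fun out d =>
    if inBoundsA rows (x + d.1) (y + d.2) && pyTruthyA (cellA rows (x + d.1) (y + d.2)) then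
      out ++ [(cellA rows (x + d.1) (y + d.2)).getD ""]
    else out) []

-- majority(values): counting dict, then max(counts, key=counts.get) (first maximal key)
def majorityA (values : List String) : Option String × Int :=
  let counts : PySem.Dict String Int :=
    values.foldl (fun d v => d.insert v (d.getD v 0 + 1)) PySem.Dict.empty
  match PySem.List.max? counts.keys (fun k => counts.getD k 0) with
  | none => (none, 0)
  | some color => (some color, counts.getD color 0)

-- body of A's innermost loop: possibly writes new_rows[y][x]
def stepCellA (current nr : List (List (Option String))) (y x : Nat) (value : Option String) :
    List (List (Option String)) :=
  let near := neighborsA current (x : Int) (y : Int)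
  let mc := majorityA near
  if value == none && pyTruthyA mc.1 && decide (5 ≤ mc.2) then
    nr.set y ((nr.getD y []).set x mc.1)
  else if !(value == none) && pyTruthyA mc.1 && !(mc.1 == value) && decide (6 ≤ mc.2) then
    nr.set y ((nr.getD y []).set x mc.1)
  else if !(value == none) && decide (near.length ≤ 1) then
    nr.set y ((nr.getD y []).set x none)
  else nr

-- one pass of A: new_rows = clone(current); nested enumerate loops mutating new_rows
def passA (current : List (List (Option String))) : List (List (Option String)) :=
  current.zipIdx.foldl
    (fun nr p => p.1.zipIdx.foldl (fun nr2 q => stepCellA current nr2 p.2 q.2 q.1) nr)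
    (cloneRowsA current)

def op_smooth (rows : List (List (Option String))) (passes : Int) : List (List (Option String)) :=
  let current := cloneRowsA rows
  let p := max 1 (min 8 passes)
  (List.range p.toNat).foldl (fun cur _ => passA cur) current

-- ===== PORT B =====

-- Python truthiness of a cell value (None and '' are falsy)
def truthyB (v : Option String) : Bool :=
  match v with
  | none => false
  | some s => !(s == "")

-- 0 <= ny < len(cur) and 0 <= nx < len(cur[ny])
def inGridB (cur : List (List (Option String))) (nx ny : Int) : Bool :=
  decide (0 ≤ ny) && decide (ny < (cur.length : Int)) &&
  decide (0 ≤ nx) && decide (nx < (((cur.getD ny.toNat []).length : Int)))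

-- the scatter state: the bucket dict and near tally, both keyed by position (nx, ny)
abbrev SctSt := PySem.Dict (Int × Int) (PySem.Dict String Int) × PySem.Dict (Int × Int) Int

-- body of the two innermost scatter loops: deposit s at one neighbor (nx, ny)
def scatTgt (cur : List (List (Option String))) (st : SctSt) (s : String)
    (y x dy dx : Int) : SctSt :=
  if (!(dy == 0 && dx == 0)) && inGridB cur (x + dx) (y + dy) then
    let key := (x + dx, y + dy)
    let bucket := st.1.getD key PySem.Dict.empty
    (st.1.insert key (bucket.insert s (bucket.getD s 0 + 1)),
     st.2.insert key (st.2.getD key 0 + 1))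
  else st

-- one source cell: if truthy, deposit its color at the 9 offsets (center skipped inside)
def scatSrc (cur : List (List (Option String))) (st : SctSt) (y x : Nat)
    (v : Option String) : SctSt :=
  if truthyB v then
    let s := v.getD ""
    [(-1 : Int), 0, 1].foldl (fun st1 dy =>
      [(-1 : Int), 0, 1].foldl (fun st2 dx =>
        scatTgt cur st2 s (y : Int) (x : Int) dy dx) st1) st
  else st

-- the whole scatter pass over the grid
def scatter (cur : List (List (Option String))) : SctSt :=
  cur.zipIdx.foldl (fun st p =>
    p.1.zipIdx.foldl (fun st2 q => scatSrc cur st2 p.2 q.2 q.1) st)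
    (PySem.Dict.empty, PySem.Dict.empty)

-- _top_color: first color in the bucket whose count equals top (None if no hit)
def topColorB (bucket : PySem.Dict String Int) (top : Int) : Option String :=
  (bucket.items.find? (fun p => p.2 == top)).map (fun p => p.1)

-- the decision loop body: the three rules from the accumulated bucket and tally
def decideCellB (counts : PySem.Dict (Int × Int) (PySem.Dict String Int))
    (nearD : PySem.Dict (Int × Int) Int) (y x : Nat) (v : Option String) : Option String :=
  let bucket := counts.getD ((x : Int), (y : Int)) PySem.Dict.empty
  let n := nearD.getD ((x : Int), (y : Int)) 0
  let top := PySem.List.maxD bucket.values (fun k => k) 0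
  if v == none then
    if decide (5 ≤ top) then topColorB bucket top else none
  else if decide (6 ≤ top) && !(topColorB bucket top == v) then topColorB bucket top
  else if decide (n ≤ 1) then none
  else v

-- one pass of B: scatter, then decide every cell
def passB (cur : List (List (Option String))) : List (List (Option String)) :=
  let st := scatter cur
  cur.zipIdx.map (fun p => p.1.zipIdx.map (fun q => decideCellB st.1 st.2 p.2 q.2 q.1))

def op_smooth_alt (rows : List (List (Option String))) (passes : Int) :
    List (List (Option String)) :=
  (List.range (max 1 (min 8 passes)).toNat).foldl (fun g _ => passB g) (rows.map (fun r => r))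

-- ===== PRECONDITION & SPEC =====
def Spec_op_smooth (rows : List (List (Option String))) (passes : Int) (out : List (List (Option String))) : Prop := out = op_smooth_alt rows passes
instance (rows : List (List (Option String))) (passes : Int) (out : List (List (Option String))) : Decidable (Spec_op_smooth rows passes out) := by unfold Spec_op_smooth; infer_instance

-- ===== CLAIM =====
def Claim_equal_op_smooth : Prop := ∀ (rows : List (List (Option String))) (passes : Int), Dom_op_smooth rows passes → Spec_op_smooth rows passes (op_smooth rows passes)

-- ===== LEMMAS AND PROOFS =====

-- the value A's inner-loop body stores at (x, y) (its own old value when no branch fires)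
def stepValueA (current : List (List (Option String))) (x y : Nat) (v : Option String) :
    Option String :=
  let near := neighborsA current (x : Int) (y : Int)
  let mc := majorityA near
  if v == none && pyTruthyA mc.1 && decide (5 ≤ mc.2) then mc.1
  else if !(v == none) && pyTruthyA mc.1 && !(mc.1 == v) && decide (6 ≤ mc.2) then mc.1
  else if !(v == none) && decide (near.length ≤ 1) then none
  else v

-- the common per-direction neighbor extractor
def hNbr (g : List (List (Option String))) (x y : Int) (d : Int × Int) : Option String :=
  if inBoundsA g (x + d.1) (y + d.2) && pyTruthyA (cellA g (x + d.1) (y + d.2)) then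
    some ((cellA g (x + d.1) (y + d.2)).getD "")
  else none

lemma pv_filter_map {α β : Type} (p : α → Bool) (f : α → β) (l : List α) :
    (l.filter p).map f = l.filterMap (fun a => if p a then some (f a) else none) := by
  induction l with
  | nil => rfl
  | cons a t ih => by_cases h : p a <;> simp [h, ih]

lemma nearA_eq (g : List (List (Option String))) (x y : Int) :
    neighborsA g x y = dirsA.filterMap (hNbr g x y) := by
  unfold neighborsA
  rw [PySem.List.foldl_append_if]
  rw [List.nil_append, pv_filter_map]
  rfl

lemma nearA_len (g : List (List (Option String))) (x y : Int) :
    (neighborsA g x y).length ≤ 8 := by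
  rw [nearA_eq]
  exact le_trans (List.length_filterMap_le _ _) (by decide)

lemma nearA_ne_empty_str (g : List (List (Option String))) (x y : Int) :
    ∀ s ∈ neighborsA g x y, s ≠ "" := by
  rw [nearA_eq]
  intro s hs
  obtain ⟨d, _, hd⟩ := List.mem_filterMap.mp hs
  unfold hNbr at hd
  split at hd
  case isTrue h =>
    rcases hc : cellA g (x + d.1) (y + d.2) with _ | t
    · rw [hc] at h; simp [pyTruthyA] at h
    · rw [hc] at h hd
      simp only [pyTruthyA, Bool.and_eq_true, Bool.not_eq_true'] at h
      simp only [Option.getD_some, Option.some.injEq] at hd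
      subst hd
      simpa using h.2
  case isFalse => exact absurd hd (by simp)

lemma count_pair_le {l : List String} {c c' : String} (h : c ≠ c') :
    l.count c + l.count c' ≤ l.length := by
  induction l with
  | nil => simp
  | cons a t ih =>
    rw [List.count_cons, List.count_cons, List.length_cons]
    by_cases h1 : a = c
    · subst h1
      have h2 : (a == c') = false := by simpa using h
      simp [h2]
      omega
    · have h1' : (a == c) = false := by simpa using h1
      by_cases h2 : a = c'
      · subst h2
        simp [h1']
        omega
      · have h2' : (a == c') = false := by simpa using h2
        simp [h1', h2']
        omega

lemma majorityA_nil : majorityA [] = (none, 0) := by decide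

lemma majorityA_spec (values : List String) (hne : values ≠ []) :
    ∃ m, m ∈ values ∧ majorityA values = (some m, (values.count m : Int)) ∧
      ∀ c ∈ values, values.count c ≤ values.count m := by
  simp only [majorityA, PySem.Dict.foldl_insert_getD_add_one_eq_counter]
  rcases hmax : PySem.List.max? (PySem.Dict.counter values).keys
      (fun k => (PySem.Dict.counter values).getD k 0) with _ | m
  · exfalso
    rw [PySem.List.max?_eq_none_iff, PySem.Dict.keys_counter] at hmax
    obtain ⟨v, t, rfl⟩ := List.exists_cons_of_ne_nil hne
    have hv : v ∈ PySem.Set.ofList (v :: t) := (PySem.Set.mem_ofList _ _).mpr (by simp)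
    rw [hmax] at hv
    exact absurd hv (by simp)
  · have hmemk := PySem.List.max?_mem hmax
    rw [PySem.Dict.keys_counter, PySem.Set.mem_ofList] at hmemk
    refine ⟨m, hmemk, ?_, ?_⟩
    · simp [PySem.Dict.getD_counter]
    · intro c hc
      have h2 := PySem.List.max?_isMax hmax c
        (by rw [PySem.Dict.keys_counter, PySem.Set.mem_ofList]; exact hc)
      rw [PySem.Dict.getD_counter, PySem.Dict.getD_counter] at h2
      exact_mod_cast h2

-- ---------- generic fold plumbing ----------

lemma foldl_proj {σ β ι : Type} (π : σ → β) (f : σ → ι → σ) (h : ι → β → β) :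
    ∀ (l : List ι) (st : σ), (∀ st i, i ∈ l → π (f st i) = h i (π st)) →
      π (l.foldl f st) = l.foldl (fun b i => h i b) (π st) := by
  intro l
  induction l with
  | nil => intro st _; rfl
  | cons a t ih =>
    intro st hstep
    rw [List.foldl_cons, List.foldl_cons, ← hstep st a (by simp)]
    exact ih _ (fun st' i hi => hstep st' i (by simp [hi]))

lemma foldl_untouched {σ β ι : Type} (π : σ → β) (f : σ → ι → σ) (bump : β → β)
    (touch : ι → Bool) :
    ∀ (l : List ι) (st : σ),
      (∀ st i, i ∈ l → π (f st i) = if touch i then bump (π st) else π st) →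
      l.countP touch = 0 → π (l.foldl f st) = π st := by
  intro l
  induction l with
  | nil => intro st _ _; rfl
  | cons a t ih =>
    intro st hstep hcnt
    rw [List.countP_cons] at hcnt
    have ha : touch a = false := by
      by_cases h : touch a = true
      · simp [h] at hcnt
      · simpa using h
    rw [List.foldl_cons, ih _ (fun st' i hi => hstep st' i (by simp [hi])) (by omega),
      hstep st a (by simp), ha]
    simp

lemma foldl_touch {σ β ι : Type} (π : σ → β) (f : σ → ι → σ) (bump : β → β)
    (touch : ι → Bool) :
    ∀ (l : List ι) (st : σ),
      (∀ st i, i ∈ l → π (f st i) = if touch i then bump (π st) else π st) →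
      l.countP touch ≤ 1 →
      π (l.foldl f st) = if l.any touch then bump (π st) else π st := by
  intro l
  induction l with
  | nil => intro st _ _; simp
  | cons a t ih =>
    intro st hstep hcnt
    rw [List.countP_cons] at hcnt
    rw [List.foldl_cons]
    by_cases ha : touch a = true
    · simp only [ha, if_true] at hcnt
      rw [foldl_untouched π f bump touch t _
        (fun st' i hi => hstep st' i (by simp [hi])) (by omega)]
      rw [hstep st a (by simp), ha]
      simp [ha]
    · have ha' : touch a = false := by simpa using ha
      rw [ih _ (fun st' i hi => hstep st' i (by simp [hi])) (by simpa [ha'] using hcnt)]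
      rw [hstep st a (by simp), ha']
      simp [ha']

lemma countP_or_disjoint {α : Type} (p q : α → Bool) :
    ∀ (l : List α), (∀ a ∈ l, ¬(p a = true ∧ q a = true)) →
      l.countP (fun a => p a || q a) = l.countP p + l.countP q := by
  intro l
  induction l with
  | nil => simp
  | cons a t ih =>
    intro h
    rw [List.countP_cons, List.countP_cons, List.countP_cons,
      ih (fun x hx => h x (by simp [hx]))]
    have := h a (by simp)
    by_cases hp : p a = true <;> by_cases hq : q a = true <;> simp [hp, hq] at this ⊢ <;> omega

lemma countP_any_split {α ι : Type} (G : ι → α → Bool) :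
    ∀ (D : List ι) (l : List α),
      D.Pairwise (fun d d' => ∀ a ∈ l, ¬(G d a = true ∧ G d' a = true)) →
      l.countP (fun a => D.any (fun d => G d a)) =
        (D.map (fun d => l.countP (G d))).sum := by
  intro D
  induction D with
  | nil => intro l _; simp
  | cons d D' ih =>
    intro l hpw
    rw [List.pairwise_cons] at hpw
    rw [List.map_cons, List.sum_cons, ← ih l hpw.2]
    rw [show (fun a => (d :: D').any fun d' => G d' a) =
      (fun a => G d a || D'.any (fun d' => G d' a)) from by funext a; simp]
    apply countP_or_disjoint
    intro a ha ⟨h1, h2⟩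
    obtain ⟨d', hd', hGd'⟩ := by simpa using h2
    exact hpw.1 d' hd' a ha ⟨h1, hGd'⟩

-- ---------- scatter characterisation ----------

-- the 9 scatter offsets in loop order, as (dy, dx)
def dirs9 : List (Int × Int) := [(-1,-1),(-1,0),(-1,1),(0,-1),(0,0),(0,1),(1,-1),(1,0),(1,1)]

-- the source cells in scatter order: (value, x, y)
def srcs (g : List (List (Option String))) : List (Option String × Nat × Nat) :=
  g.zipIdx.flatMap (fun p => p.1.zipIdx.map (fun q => (q.1, q.2, p.2)))

-- does source (v, x, y) deposit at target t?
def deposits (cur : List (List (Option String))) (t : Int × Int)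
    (c : Option String × Nat × Nat) : Bool :=
  truthyB c.1 && dirs9.any (fun d =>
    (!(d.1 == 0 && d.2 == 0)) && inGridB cur ((c.2.1 : Int) + d.2) ((c.2.2 : Int) + d.1) &&
    (((c.2.1 : Int) + d.2, (c.2.2 : Int) + d.1) == t))

-- the multiset of colors deposited at t, in scatter order
def contrib (cur : List (List (Option String))) (t : Int × Int) : List String :=
  ((srcs cur).filter (deposits cur t)).map (fun c => c.1.getD "")

-- bump of the bucket at t by color s
def bumpB (b : PySem.Dict String Int) (s : String) : PySem.Dict String Int :=
  b.insert s (b.getD s 0 + 1)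

lemma scatTgt_fst (cur : List (List (Option String))) (st : SctSt) (s : String)
    (y x dy dx : Int) (t : Int × Int) :
    (scatTgt cur st s y x dy dx).1.getD t PySem.Dict.empty =
      if (!(dy == 0 && dx == 0)) && inGridB cur (x + dx) (y + dy) &&
          ((x + dx, y + dy) == t) then
        bumpB (st.1.getD t PySem.Dict.empty) s
      else st.1.getD t PySem.Dict.empty := by
  unfold scatTgt bumpB
  by_cases hg : ((!(dy == 0 && dx == 0)) && inGridB cur (x + dx) (y + dy)) = true
  · rw [if_pos hg]
    by_cases ht : t = (x + dx, y + dy)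
    · have : ((x + dx, y + dy) == t) = true := by subst ht; simp
      simp only [hg, this, Bool.and_self]
      rw [PySem.Dict.getD_insert, if_pos ht, ht]
      simp
    · have hne : ((x + dx, y + dy) == t) = false := by
        simpa using fun h => ht h.symm
      simp only [hg, hne, Bool.and_false]
      rw [PySem.Dict.getD_insert, if_neg ht]
      simp
  · have hg' : ((!(dy == 0 && dx == 0)) && inGridB cur (x + dx) (y + dy)) = false := by
      simpa using hg
    rw [hg']
    simp

lemma scatTgt_snd (cur : List (List (Option String))) (st : SctSt) (s : String)
    (y x dy dx : Int) (t : Int × Int) :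
    (scatTgt cur st s y x dy dx).2.getD t 0 =
      if (!(dy == 0 && dx == 0)) && inGridB cur (x + dx) (y + dy) &&
          ((x + dx, y + dy) == t) then
        st.2.getD t 0 + 1
      else st.2.getD t 0 := by
  unfold scatTgt
  by_cases hg : ((!(dy == 0 && dx == 0)) && inGridB cur (x + dx) (y + dy)) = true
  · rw [if_pos hg]
    by_cases ht : t = (x + dx, y + dy)
    · have : ((x + dx, y + dy) == t) = true := by subst ht; simp
      simp only [hg, this, Bool.and_self]
      rw [PySem.Dict.getD_insert, if_pos ht, ht]
      simp
    · have hne : ((x + dx, y + dy) == t) = false := by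
        simpa using fun h => ht h.symm
      simp only [hg, hne, Bool.and_false]
      rw [PySem.Dict.getD_insert, if_neg ht]
      simp
  · have hg' : ((!(dy == 0 && dx == 0)) && inGridB cur (x + dx) (y + dy)) = false := by
      simpa using hg
    rw [hg']
    simp

-- the nested dy/dx loops are the fold over the 9 offsets
lemma scatSrc_as_dirs9 (cur : List (List (Option String))) (st : SctSt) (s : String)
    (y x : Int) :
    [(-1 : Int), 0, 1].foldl (fun st1 dy =>
        [(-1 : Int), 0, 1].foldl (fun st2 dx => scatTgt cur st2 s y x dy dx) st1) st
      = dirs9.foldl (fun st2 d => scatTgt cur st2 s y x d.1 d.2) st := by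
  simp only [dirs9, List.foldl]

-- a target position is hit by at most one of the 9 offsets
lemma dirs9_touch_le_one (x y : Int) (t : Int × Int) (p : Int × Int → Bool) :
    dirs9.countP (fun d => p d && ((x + d.2, y + d.1) == t)) ≤ 1 := by
  have hmono : dirs9.countP (fun d => p d && ((x + d.2, y + d.1) == t))
      ≤ dirs9.countP (fun d => ((x + d.2, y + d.1) == t)) := by
    apply List.countP_mono_left
    intro d _ h
    exact (Bool.and_eq_true _ _ |>.mp h).2
  refine le_trans hmono ?_
  have hinj : Function.Injective (fun d : Int × Int => ((x + d.2, y + d.1) : Int × Int)) := by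
    intro a b hab
    simp only [Prod.mk.injEq] at hab
    exact Prod.ext (by omega) (by omega)
  have hnd : (dirs9.map (fun d : Int × Int => ((x + d.2, y + d.1) : Int × Int))).Nodup :=
    (by decide : dirs9.Nodup).map hinj
  have : dirs9.countP (fun d => ((x + d.2, y + d.1) == t))
      = (dirs9.map (fun d : Int × Int => ((x + d.2, y + d.1) : Int × Int))).count t := by
    rw [List.count_eq_countP, List.countP_map]
    rfl
  rw [this]
  exact List.nodup_iff_count_le_one.mp hnd t

lemma scatSrc_fst (cur : List (List (Option String))) (st : SctSt)
    (y x : Nat) (v : Option String) (t : Int × Int) :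
    (scatSrc cur st y x v).1.getD t PySem.Dict.empty =
      if deposits cur t (v, x, y) then
        bumpB (st.1.getD t PySem.Dict.empty) (v.getD "")
      else st.1.getD t PySem.Dict.empty := by
  unfold scatSrc deposits
  by_cases htr : truthyB v = true
  · rw [if_pos htr]
    simp only
    rw [scatSrc_as_dirs9]
    rw [foldl_touch (fun st : SctSt => st.1.getD t PySem.Dict.empty)
      (fun st2 d => scatTgt cur st2 (v.getD "") (y : Int) (x : Int) d.1 d.2)
      (fun b => bumpB b (v.getD ""))
      (fun d => (!(d.1 == 0 && d.2 == 0)) && inGridB cur ((x : Int) + d.2) ((y : Int) + d.1) &&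
        (((x : Int) + d.2, (y : Int) + d.1) == t))
      dirs9 st
      (fun st' d _ => scatTgt_fst cur st' (v.getD "") (y : Int) (x : Int) d.1 d.2 t)
      (dirs9_touch_le_one (x : Int) (y : Int) t _)]
    rw [htr, Bool.true_and]
  · have htr' : truthyB v = false := by simpa using htr
    simp [htr']

lemma scatSrc_snd (cur : List (List (Option String))) (st : SctSt)
    (y x : Nat) (v : Option String) (t : Int × Int) :
    (scatSrc cur st y x v).2.getD t 0 =
      if deposits cur t (v, x, y) then st.2.getD t 0 + 1
      else st.2.getD t 0 := by
  unfold scatSrc deposits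
  by_cases htr : truthyB v = true
  · rw [if_pos htr]
    simp only
    rw [scatSrc_as_dirs9]
    rw [foldl_touch (fun st : SctSt => st.2.getD t 0)
      (fun st2 d => scatTgt cur st2 (v.getD "") (y : Int) (x : Int) d.1 d.2)
      (fun b => b + 1)
      (fun d => (!(d.1 == 0 && d.2 == 0)) && inGridB cur ((x : Int) + d.2) ((y : Int) + d.1) &&
        (((x : Int) + d.2, (y : Int) + d.1) == t))
      dirs9 st
      (fun st' d _ => scatTgt_snd cur st' (v.getD "") (y : Int) (x : Int) d.1 d.2 t)
      (dirs9_touch_le_one (x : Int) (y : Int) t _)]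
    rw [htr, Bool.true_and]
  · have htr' : truthyB v = false := by simpa using htr
    simp [htr']

lemma scatter_fst (cur : List (List (Option String))) (t : Int × Int) :
    (scatter cur).1.getD t PySem.Dict.empty = PySem.Dict.counter (contrib cur t) := by
  unfold scatter
  rw [foldl_proj (fun st : SctSt => st.1.getD t PySem.Dict.empty) _
    (fun p b => p.1.zipIdx.foldl
      (fun b2 q => if deposits cur t (q.1, q.2, p.2) then bumpB b2 (q.1.getD "") else b2) b)
    cur.zipIdx (PySem.Dict.empty, PySem.Dict.empty)
    (fun st p _ => foldl_proj (fun st : SctSt => st.1.getD t PySem.Dict.empty) _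
      (fun q b2 => if deposits cur t (q.1, q.2, p.2) then bumpB b2 (q.1.getD "") else b2)
      p.1.zipIdx st (fun st' q _ => scatSrc_fst cur st' p.2 q.2 q.1 t))]
  have hflat : cur.zipIdx.foldl (fun b p => p.1.zipIdx.foldl
      (fun b2 q => if deposits cur t (q.1, q.2, p.2) then bumpB b2 (q.1.getD "") else b2) b)
      (PySem.Dict.empty.getD t PySem.Dict.empty)
      = (srcs cur).foldl
        (fun b c => if deposits cur t c then bumpB b (c.1.getD "") else b)
        PySem.Dict.empty := by
    rw [srcs, List.foldl_flatMap]
    simp only [List.foldl_map, PySem.Dict.getD_empty]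
  rw [hflat, PySem.List.foldl_if_eq_foldl_filter (deposits cur t)
    (fun b c => bumpB b (c.1.getD ""))]
  rw [contrib, ← PySem.Dict.foldl_insert_getD_add_one_eq_counter, List.foldl_map]
  simp only [bumpB]

lemma scatter_snd (cur : List (List (Option String))) (t : Int × Int) :
    (scatter cur).2.getD t 0 = ((contrib cur t).length : Int) := by
  unfold scatter
  rw [foldl_proj (fun st : SctSt => st.2.getD t 0) _
    (fun p b => p.1.zipIdx.foldl
      (fun b2 q => if deposits cur t (q.1, q.2, p.2) then b2 + 1 else b2) b)
    cur.zipIdx (PySem.Dict.empty, PySem.Dict.empty)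
    (fun st p _ => foldl_proj (fun st : SctSt => st.2.getD t 0) _
      (fun q b2 => if deposits cur t (q.1, q.2, p.2) then b2 + 1 else b2)
      p.1.zipIdx st (fun st' q _ => scatSrc_snd cur st' p.2 q.2 q.1 t))]
  have hflat : cur.zipIdx.foldl (fun b p => p.1.zipIdx.foldl
      (fun b2 q => if deposits cur t (q.1, q.2, p.2) then b2 + 1 else b2) b)
      ((PySem.Dict.empty : PySem.Dict (Int × Int) Int).getD t 0)
      = (srcs cur).foldl (fun b c => if deposits cur t c then b + 1 else b) 0 := by
    rw [srcs, List.foldl_flatMap]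
    simp only [List.foldl_map, PySem.Dict.getD_empty]
  rw [hflat, PySem.List.foldl_if_add_one]
  rw [contrib, List.length_map, ← List.countP_eq_length_filter]
  simp

-- ---------- contrib is a permutation of A's neighbor list ----------

lemma count_filterMap {ι β : Type} [BEq β] [LawfulBEq β] (f : ι → Option β) (b : β) :
    ∀ l : List ι, (l.filterMap f).count b = l.countP (fun i => f i == some b) := by
  intro l
  induction l with
  | nil => simp
  | cons a t ih =>
    rw [List.countP_cons]
    rcases hf : f a with _ | w
    · simp [hf, ih]
    · simp only [List.filterMap_cons, hf, List.count_cons, ih]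
      by_cases hw : w = b <;> simp [hw, Nat.add_comm]

-- the counted-value predicate at a source cell
def Qc (c : String) (v : Option String) : Bool := truthyB v && (v.getD "" == c)

-- source a deposits colour c at t via offset d
def Gd (g : List (List (Option String))) (t : Int × Int) (c : String) (d : Int × Int)
    (a : Option String × Nat × Nat) : Bool :=
  (!(d.1 == 0 && d.2 == 0)) && inGridB g ((a.2.1 : Int) + d.2) ((a.2.2 : Int) + d.1) &&
    (((a.2.1 : Int) + d.2, (a.2.2 : Int) + d.1) == t) && Qc c a.1

-- how many cells of one row sit at column px and satisfy Q
lemma rowInd (Q : Option String → Bool) (px : Int) :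
    ∀ (row : List (Option String)) (n : Nat),
      (row.zipIdx n).countP (fun q => decide ((q.2 : Int) = px) && Q q.1)
      = if (n : Int) ≤ px ∧ px < (n : Int) + row.length ∧
            Q (row.getD (px - n).toNat none) = true then 1 else 0 := by
  intro row
  induction row with
  | nil =>
    intro n
    rw [List.zipIdx_nil, List.countP_nil, if_neg]
    rintro ⟨h1, h2, -⟩
    simp only [List.length_nil, Nat.cast_zero, add_zero] at h2
    omega
  | cons v row' ih =>
    intro n
    rw [List.zipIdx_cons, List.countP_cons, ih (n + 1)]
    by_cases hpx : (n : Int) = px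
    · rw [if_neg (by rintro ⟨h1, -, -⟩; push_cast at h1; omega)]
      have h0 : (px - (n : Int)).toNat = 0 := by omega
      have hd : (decide ((n : Int) = px)) = true := by simpa using hpx
      rw [h0, hd, Bool.true_and]
      simp only [List.getD_cons_zero]
      by_cases hq : Q v = true
      · rw [if_pos hq, if_pos ⟨by omega, by simp only [List.length_cons]; omega, hq⟩]
      · have hq' : Q v = false := by simpa using hq
        rw [hq']
        simp
    · have hd : (decide ((n : Int) = px)) = false := by simpa using hpx
      rw [hd, Bool.false_and]
      simp only [Bool.false_eq_true, if_false, Nat.add_zero]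
      apply if_congr _ rfl rfl
      constructor
      · rintro ⟨h1, h2, h3⟩
        push_cast at h1 h2
        refine ⟨by omega, by simp only [List.length_cons]; omega, ?_⟩
        have hsucc : (px - (n : Int)).toNat = (px - ((n : Int) + 1)).toNat + 1 := by omega
        rw [hsucc, List.getD_cons_succ]
        convert h3 using 3
      · rintro ⟨h1, h2, h3⟩
        have h1' : ((n : Int) + 1) ≤ px := by omega
        refine ⟨by push_cast; omega,
          by simp only [List.length_cons] at h2; omega, ?_⟩
        have hsucc : (px - (n : Int)).toNat = (px - ((n : Int) + 1)).toNat + 1 := by omega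
        rw [hsucc, List.getD_cons_succ] at h3
        convert h3 using 3

-- a mapped row's contribution to the grid count
lemma countP_row (Q : Option String → Bool) (px py : Int)
    (row : List (Option String)) (m : Nat) :
    (row.zipIdx.map (fun q : Option String × Nat => (q.1, q.2, m))).countP
      (fun a : Option String × Nat × Nat =>
        decide ((a.2.1 : Int) = px ∧ (a.2.2 : Int) = py) && Q a.1)
    = if (m : Int) = py then
        (row.zipIdx).countP (fun q => decide ((q.2 : Int) = px) && Q q.1)
      else 0 := by
  rw [List.countP_map]
  by_cases hpy : (m : Int) = py
  · rw [if_pos hpy]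
    apply List.countP_congr
    intro q _
    simp [hpy]
  · rw [if_neg hpy]
    apply List.countP_eq_zero.mpr
    intro q _
    simp [hpy]

-- how many source cells of the whole grid sit at (px, py) and satisfy Q
lemma gridInd' (Q : Option String → Bool) (px py : Int) :
    ∀ (g : List (List (Option String))) (n : Nat),
      ((g.zipIdx n).flatMap (fun p : List (Option String) × Nat =>
          p.1.zipIdx.map (fun q : Option String × Nat =>
            ((q.1, q.2, p.2) : Option String × Nat × Nat)))).countP
        (fun a : Option String × Nat × Nat =>
          decide ((a.2.1 : Int) = px ∧ (a.2.2 : Int) = py) && Q a.1)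
      = if (n : Int) ≤ py ∧ py < (n : Int) + g.length then
          (if 0 ≤ px ∧ px < ((g.getD (py - n).toNat []).length : Int) ∧
              Q ((g.getD (py - n).toNat []).getD px.toNat none) = true then 1 else 0)
        else 0 := by
  intro g
  induction g with
  | nil =>
    intro n
    rw [List.zipIdx_nil, List.flatMap_nil, List.countP_nil, if_neg]
    rintro ⟨h1, h2⟩
    simp only [List.length_nil, Nat.cast_zero, add_zero] at h2
    omega
  | cons row g' ih =>
    intro n
    simp only [List.zipIdx_cons, List.flatMap_cons, List.countP_append]
    rw [countP_row Q px py row n, ih (n + 1), rowInd Q px row 0]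
    push_cast [List.length_cons]
    simp only [zero_add, sub_zero]
    by_cases hpy : (n : Int) = py
    · rw [if_pos hpy,
        if_neg (show ¬((n : Int) + 1 ≤ py ∧ py < (n : Int) + 1 + (g'.length : Int)) from by
          omega),
        Nat.add_zero,
        if_pos (show (n : Int) ≤ py ∧ py < (n : Int) + ((g'.length : Int) + 1) from by
          constructor <;> omega)]
      have h0 : (py - (n : Int)).toNat = 0 := by omega
      rw [h0]
      simp only [List.getD_cons_zero]
    · rw [if_neg hpy, Nat.zero_add]
      by_cases hc : ((n : Int) + 1) ≤ py ∧ py < ((n : Int) + 1) + (g'.length : Int)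
      · rw [if_pos hc,
          if_pos (show (n : Int) ≤ py ∧ py < (n : Int) + ((g'.length : Int) + 1) from by
            constructor <;> omega)]
        have hsucc : (py - (n : Int)).toNat = (py - ((n : Int) + 1)).toNat + 1 := by omega
        rw [hsucc, List.getD_cons_succ]
      · rw [if_neg hc,
          if_neg (show ¬((n : Int) ≤ py ∧ py < (n : Int) + ((g'.length : Int) + 1)) from by
            omega)]

-- count of colour-c deposits arriving from one offset, as a neighbor read
lemma countP_Gd (g : List (List (Option String))) (tx ty : Nat)
    (hy : ty < g.length) (hx : tx < (g.getD ty []).length) (c : String) (d : Int × Int)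
    (hd : (!(d.1 == 0 && d.2 == 0)) = true) :
    (srcs g).countP (Gd g ((tx : Int), (ty : Int)) c d)
      = if hNbr g (tx : Int) (ty : Int) (-d.2, -d.1) == some c then 1 else 0 := by
  have htb : inGridB g (tx : Int) (ty : Int) = true := by
    unfold inGridB
    have h2 : ((ty : Int)).toNat = ty := by omega
    rw [h2]
    simp only [Bool.and_eq_true, decide_eq_true_eq]
    refine ⟨⟨⟨by omega, by exact_mod_cast hy⟩, by omega⟩, by exact_mod_cast hx⟩
  have hcong : (srcs g).countP (Gd g ((tx : Int), (ty : Int)) c d)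
      = (srcs g).countP (fun a =>
          decide ((a.2.1 : Int) = (tx : Int) - d.2 ∧ (a.2.2 : Int) = (ty : Int) - d.1) &&
          Qc c a.1) := by
    apply List.countP_congr
    intro a _
    unfold Gd
    by_cases hk : ((a.2.1 : Int) + d.2, (a.2.2 : Int) + d.1) = ((tx : Int), (ty : Int))
    · have hk' : (((a.2.1 : Int) + d.2, (a.2.2 : Int) + d.1) == ((tx : Int), (ty : Int))) = true := by
        simpa using hk
      have hco : ((a.2.1 : Int) = (tx : Int) - d.2 ∧ (a.2.2 : Int) = (ty : Int) - d.1) := by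
        simp only [Prod.mk.injEq] at hk
        omega
      have hgr : inGridB g ((a.2.1 : Int) + d.2) ((a.2.2 : Int) + d.1) = true := by
        simp only [Prod.mk.injEq] at hk
        rw [hk.1, hk.2]
        exact htb
      simp [hco, hd, htb]
    · have hk' : (((a.2.1 : Int) + d.2, (a.2.2 : Int) + d.1) == ((tx : Int), (ty : Int))) = false := by
        simpa using hk
      have hco : ¬((a.2.1 : Int) = (tx : Int) - d.2 ∧ (a.2.2 : Int) = (ty : Int) - d.1) := by
        simp only [Prod.mk.injEq] at hk
        omega
      simp [hk', hco]
  rw [hcong, srcs, gridInd' (Qc c) ((tx : Int) - d.2) ((ty : Int) - d.1) g 0]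
  unfold hNbr inBoundsA cellA pyTruthyA Qc truthyB
  have harg1 : (tx : Int) + (-d.2, -d.1).1 = (tx : Int) - d.2 := by simp; ring
  have harg2 : (ty : Int) + (-d.2, -d.1).2 = (ty : Int) - d.1 := by simp; ring
  rw [harg1, harg2]
  simp only [Nat.cast_zero, zero_add, sub_zero]
  by_cases h1 : (0 : Int) ≤ (ty : Int) - d.1 ∧ (ty : Int) - d.1 < (g.length : Int)
  · rw [if_pos (by exact ⟨by omega, by omega⟩)]
    set row := g.getD ((ty : Int) - d.1).toNat [] with hrow
    by_cases h2 : (0 : Int) ≤ (tx : Int) - d.2 ∧ (tx : Int) - d.2 < (row.length : Int)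
    · have hb : (decide (0 ≤ (ty : Int) - d.1) && decide ((ty : Int) - d.1 < (g.length : Int)) &&
          decide (0 ≤ (tx : Int) - d.2) && decide ((tx : Int) - d.2 < (row.length : Int))) = true := by
        simp only [Bool.and_eq_true, decide_eq_true_eq]
        exact ⟨⟨⟨h1.1, h1.2⟩, h2.1⟩, h2.2⟩
      rw [hb, Bool.true_and]
      set w := row.getD ((tx : Int) - d.2).toNat none with hw
      rcases w with _ | sw
      · simp
      · by_cases hsw : sw = ""
        · simp [hsw]
        · have hnb : (sw == "") = false := by simpa using hsw
          by_cases hc : sw = c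
          · simp [hc]
            rw [if_pos ⟨by omega, by omega, hc ▸ hsw⟩, if_neg (hc ▸ hsw)]
          · have hnc : (sw == c) = false := by simpa using hc
            simp [hnb, hnc]
    · have hb : (decide (0 ≤ (ty : Int) - d.1) && decide ((ty : Int) - d.1 < (g.length : Int)) &&
          decide (0 ≤ (tx : Int) - d.2) && decide ((tx : Int) - d.2 < (row.length : Int))) = false := by
        simp only [Bool.and_eq_false_iff] at h2 ⊢
        by_cases ha : (0 : Int) ≤ (tx : Int) - d.2
        · right; simp only [decide_eq_false_iff_not]; intro hlt; exact h2 ⟨ha, hlt⟩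
        · left; right; simpa using ha
      rw [hb, Bool.false_and]
      rw [if_neg (by rintro ⟨ha, hb2, -⟩; exact h2 ⟨ha, hb2⟩)]
      simp
  · rw [if_neg (by rintro ⟨ha, hb2⟩; exact h1 ⟨by omega, by omega⟩)]
    have hb : (decide (0 ≤ (ty : Int) - d.1) && decide ((ty : Int) - d.1 < (g.length : Int))) = false := by
      rw [Bool.and_eq_false_iff]
      rcases not_and_or.mp h1 with ha | ha
      · exact Or.inl (by simpa using ha)
      · exact Or.inr (by simpa using ha)
    rw [show (decide (0 ≤ (ty : Int) - d.1) && decide ((ty : Int) - d.1 < (g.length : Int)) &&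
        decide (0 ≤ (tx : Int) - d.2) &&
        decide ((tx : Int) - d.2 < (((g.getD ((ty : Int) - d.1).toNat []).length : Nat) : Int))) = false from by
      rw [Bool.and_eq_false_iff, Bool.and_eq_false_iff]; left; left; exact hb]
    simp

lemma contrib_count (g : List (List (Option String))) (tx ty : Nat)
    (hy : ty < g.length) (hx : tx < (g.getD ty []).length) (c : String) :
    (contrib g ((tx : Int), (ty : Int))).count c
      = (neighborsA g (tx : Int) (ty : Int)).count c := by
  -- left side: scatter deposits, split per offset
  rw [contrib, List.count_eq_countP, List.countP_map, List.countP_filter]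
  have hG : (srcs g).countP (fun a =>
        ((fun s => s == c) ∘ fun (a : Option String × Nat × Nat) => a.1.getD "") a &&
        deposits g ((tx : Int), (ty : Int)) a)
      = (srcs g).countP (fun a => dirs9.any (fun d => Gd g ((tx : Int), (ty : Int)) c d a)) := by
    apply List.countP_congr
    intro a _
    unfold deposits Gd Qc
    cases htr : truthyB a.1 <;> cases hvc : (a.1.getD "" == c) <;>
      simp [hvc, Function.comp]
  rw [hG]
  rw [countP_any_split (Gd g ((tx : Int), (ty : Int)) c) dirs9 (srcs g) ?hpw]
  case hpw =>
    refine List.Pairwise.imp ?_ ((by decide : dirs9.Nodup))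
    intro d d' hne a _ ⟨hGd, hGd'⟩
    unfold Gd at hGd hGd'
    simp only [Bool.and_eq_true, beq_iff_eq, Prod.mk.injEq] at hGd hGd'
    exact hne (Prod.ext (by omega) (by omega))
  -- right side: A's gather, counted per direction
  rw [nearA_eq, count_filterMap]
  have hmap : dirs9.map (fun d => (srcs g).countP (Gd g ((tx : Int), (ty : Int)) c d))
      = dirs9.map (fun d => if d = ((0 : Int), (0 : Int)) then 0
          else if hNbr g (tx : Int) (ty : Int) (-d.2, -d.1) == some c then 1 else 0) := by
    apply List.map_congr_left
    intro d hdm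
    by_cases hd0 : d = ((0 : Int), (0 : Int))
    · rw [if_pos hd0]
      apply List.countP_eq_zero.mpr
      intro a _
      unfold Gd
      rw [hd0]
      simp
    · rw [if_neg hd0]
      have hd : (!(d.1 == 0 && d.2 == 0)) = true := by
        simp only [Bool.not_eq_true', Bool.and_eq_false_iff, beq_eq_false_iff_ne, ne_eq]
        by_cases h1 : d.1 = 0
        · right; intro h2; exact hd0 (Prod.ext h1 h2)
        · left; exact h1
      exact countP_Gd g tx ty hy hx c d hd
  rw [hmap]
  simp only [dirs9, dirsA, List.map_cons, List.map_nil, List.sum_cons, List.sum_nil,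
    List.countP_cons, List.countP_nil]
  norm_num [Prod.ext_iff]
  omega

lemma contrib_perm (g : List (List (Option String))) (tx ty : Nat)
    (hy : ty < g.length) (hx : tx < (g.getD ty []).length) :
    (contrib g ((tx : Int), (ty : Int))).Perm (neighborsA g (tx : Int) (ty : Int)) := by
  apply List.perm_iff_count.mpr
  intro c
  exact contrib_count g tx ty hy hx c

-- ---------- the decision agrees with A's per-cell step ----------

lemma values_counter_eq (L : List String) :
    (PySem.Dict.counter L).values = (PySem.Set.ofList L).map (fun k => (L.count k : Int)) := by
  show (PySem.Dict.counter L).items.map (·.2) = _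
  rw [PySem.Dict.items_counter, List.map_map]
  rfl

lemma cell_eq (g : List (List (Option String))) (x y : Nat)
    (hy : y < g.length) (hx : x < (g.getD y []).length) (v : Option String) :
    decideCellB (scatter g).1 (scatter g).2 y x v = stepValueA g x y v := by
  have hperm := contrib_perm g x y hy hx
  have hbucket := scatter_fst g ((x : Int), (y : Int))
  have hn := scatter_snd g ((x : Int), (y : Int))
  simp only [decideCellB, stepValueA]
  rw [hbucket, hn]
  by_cases hAnil : neighborsA g (x : Int) (y : Int) = []
  · have hLnil : contrib g ((x : Int), (y : Int)) = [] := by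
      rw [← List.perm_nil]
      rw [hAnil] at hperm
      exact hperm
    rw [hLnil, hAnil]
    have hc0 : PySem.Dict.counter ([] : List String) = PySem.Dict.empty := rfl
    rw [hc0]
    cases v <;>
      simp [majorityA_nil, pyTruthyA, topColorB, PySem.List.maxD,
        show (PySem.Dict.empty : PySem.Dict String Int).values = [] from rfl,
        show (PySem.Dict.empty : PySem.Dict String Int).items = [] from rfl,
        show PySem.List.max? ([] : List Int) (fun k => k) = none from rfl]
  · have hLnil : contrib g ((x : Int), (y : Int)) ≠ [] := by
      intro h
      rw [h] at hperm
      exact hAnil (List.perm_nil.mp hperm.symm)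
    obtain ⟨m, hmem, heq, hmax⟩ := majorityA_spec _ hAnil
    set L := contrib g ((x : Int), (y : Int)) with hLdef
    set nA := neighborsA g (x : Int) (y : Int) with hnAdef
    have hcnt : ∀ c, L.count c = nA.count c := fun c => hperm.count_eq c
    have hlen : L.length = nA.length := hperm.length_eq
    have hlen8 : nA.length ≤ 8 := nearA_len g (x : Int) (y : Int)
    have hvals := values_counter_eq L
    have hofne : PySem.Set.ofList L ≠ [] := by
      obtain ⟨a, ha⟩ := List.exists_mem_of_ne_nil L hLnil
      intro h
      have : a ∈ PySem.Set.ofList L := (PySem.Set.mem_ofList _ _).mpr ha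
      rw [h] at this
      exact absurd this (by simp)
    have hvne : (PySem.Dict.counter L).values ≠ [] := by
      rw [hvals]
      simpa using hofne
    obtain ⟨tv, htv⟩ : ∃ tv, PySem.List.max? (PySem.Dict.counter L).values (fun k => k) = some tv := by
      rcases hmx : PySem.List.max? (PySem.Dict.counter L).values (fun k => k) with _ | tv
      · exact absurd ((PySem.List.max?_eq_none_iff _ _).mp hmx) hvne
      · exact ⟨tv, rfl⟩
    have htop : PySem.List.maxD (PySem.Dict.counter L).values (fun k => k) 0 = tv := by
      rw [PySem.List.maxD, htv]
      rfl
    have hmemL : m ∈ L := hperm.mem_iff.mpr hmem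
    have hmofL : m ∈ PySem.Set.ofList L := (PySem.Set.mem_ofList _ _).mpr hmemL
    have hmval : ((L.count m : Nat) : Int) ∈ (PySem.Dict.counter L).values := by
      rw [hvals]
      exact List.mem_map_of_mem hmofL
    have htvmax := PySem.List.max?_isMax htv
    have htvmem := PySem.List.max?_mem htv
    have htveq : tv = ((nA.count m : Nat) : Int) := by
      rw [hvals] at htvmem
      obtain ⟨k0, hk0, hk0v⟩ := List.mem_map.mp htvmem
      have hk0L : k0 ∈ L := (PySem.Set.mem_ofList _ _).mp hk0
      have h1 : tv ≤ ((nA.count m : Nat) : Int) := by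
        rw [← hk0v, hcnt k0]
        exact_mod_cast hmax k0 (hperm.mem_iff.mp hk0L)
      have h2 : ((nA.count m : Nat) : Int) ≤ tv := by
        have := htvmax _ hmval
        rw [hcnt m] at this
        exact this
      omega
    have hcountlen : nA.count m ≤ nA.length := List.count_le_length
    have hmne : m ≠ "" := nearA_ne_empty_str g (x : Int) (y : Int) m hmem
    have hfw : (5 : Int) ≤ tv → topColorB (PySem.Dict.counter L) tv = some m := by
      intro h5
      unfold topColorB
      have hitems : (PySem.Dict.counter L).items
          = (PySem.Set.ofList L).map (fun k => (k, (L.count k : Int))) :=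
        PySem.Dict.items_counter L
      rw [hitems, List.find?_map]
      have hcomp : ((fun p : String × Int => p.2 == tv) ∘ fun k => (k, (L.count k : Int)))
          = fun k => ((L.count k : Int) == tv) := rfl
      rw [hcomp]
      rcases hfind : (PySem.Set.ofList L).find? (fun k => ((L.count k : Int) == tv)) with _ | k'
      · exfalso
        have := List.find?_eq_none.mp hfind m hmofL
        rw [hcnt m, ← htveq] at this
        simp at this
      · have hk'of := List.mem_of_find?_eq_some hfind
        have hk'L : k' ∈ L := (PySem.Set.mem_ofList _ _).mp hk'of
        have hk'c : ((L.count k' : Nat) : Int) = tv := by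
          have := List.find?_some hfind
          simpa using this
        have hk'm : k' = m := by
          by_contra hkm
          have hpair := count_pair_le (l := nA) (c := k') (c' := m) hkm
          have e1 : ((nA.count k' : Nat) : Int) = tv := by rw [← hcnt k']; exact hk'c
          have e2 : ((nA.count m : Nat) : Int) = tv := htveq.symm
          omega
        rw [hk'm]
        simp
    rw [htop, heq]
    have hpt : pyTruthyA (some m) = true := by simpa [pyTruthyA] using hmne
    by_cases h5 : (5 : Int) ≤ tv
    · have htc := hfw h5
      have h5i : (5 : Int) ≤ ((nA.count m : Nat) : Int) := by rw [← htveq]; exact h5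
      have h5n : 5 ≤ nA.count m := by exact_mod_cast h5i
      have hlenge : 5 ≤ nA.length := le_trans h5n hcountlen
      have hnotAl : ¬(nA.length ≤ 1) := by omega
      have hnotLl : ¬(((L.length : Nat) : Int) ≤ 1) := by
        have : 5 ≤ L.length := by omega
        have h2 : (5 : Int) ≤ ((L.length : Nat) : Int) := by exact_mod_cast this
        omega
      rcases v with _ | s
      · simp [h5, h5i, htc, hpt]
      · by_cases h6 : (6 : Int) ≤ tv
        · have h6i : (6 : Int) ≤ ((nA.count m : Nat) : Int) := by rw [← htveq]; exact h6
          by_cases hms : m = s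
          · subst hms
            simp [htc, hpt, h6, h6i, hnotAl, hnotLl]
          · have hbeq : (some m == some s) = false := by simpa using hms
            simp [htc, hpt, h6, h6i, hbeq]
        · have h6i : ¬((6 : Int) ≤ ((nA.count m : Nat) : Int)) := by rw [← htveq]; exact h6
          simp [htc, hpt, h6, h6i, hnotAl, hnotLl]
    · have h5i : ¬((5 : Int) ≤ ((nA.count m : Nat) : Int)) := by rw [← htveq]; exact h5
      have h6 : ¬((6 : Int) ≤ tv) := by omega
      have h6i : ¬((6 : Int) ≤ ((nA.count m : Nat) : Int)) := by rw [← htveq]; exact h6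
      rcases v with _ | s
      · simp [h5, h5i, hpt]
      · by_cases hl1 : nA.length ≤ 1
        · have hlli : ((L.length : Nat) : Int) ≤ 1 := by
            have : L.length ≤ 1 := by omega
            exact_mod_cast this
          simp [h6, h6i, hl1, hlli, hpt]
        · have hlli : ¬(((L.length : Nat) : Int) ≤ 1) := by
            have : ¬(L.length ≤ 1) := by omega
            omega
          simp [h6, h6i, hl1, hlli, hpt]

-- ---------- A's pass as a map (from the mutation fold) ----------

lemma pv_getD_append {α : Type} (A : List α) (r : α) (B : List α) (d : α) :
    (A ++ r :: B).getD A.length d = r := by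
  induction A with
  | nil => rfl
  | cons a t _ => simp

lemma pv_set_append {α : Type} (A : List α) (r r' : α) (B : List α) :
    (A ++ r :: B).set A.length r' = A ++ r' :: B := by
  induction A with
  | nil => rfl
  | cons a t ih => simp [ih]

lemma stepCellA_split (current : List (List (Option String)))
    (Ag Bg : List (List (Option String))) (pre rest : List (Option String)) (v : Option String) :
    stepCellA current (Ag ++ (pre ++ v :: rest) :: Bg) Ag.length pre.length v
      = Ag ++ (pre ++ stepValueA current pre.length Ag.length v :: rest) :: Bg := by
  simp only [stepCellA, stepValueA]
  split_ifs <;>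
    simp only [pv_getD_append, pv_set_append]

lemma inner_fold (current : List (List (Option String)))
    (Ag Bg : List (List (Option String))) (rest pre : List (Option String)) :
    (rest.zipIdx pre.length).foldl
        (fun nr2 q => stepCellA current nr2 Ag.length q.2 q.1)
        (Ag ++ (pre ++ rest) :: Bg)
      = Ag ++ (pre ++ (rest.zipIdx pre.length).map
          (fun q => stepValueA current q.2 Ag.length q.1)) :: Bg := by
  induction rest generalizing pre with
  | nil => simp
  | cons a rest' ih =>
    rw [List.zipIdx_cons, List.foldl_cons, List.map_cons]
    rw [stepCellA_split]
    rw [List.append_cons pre (stepValueA current pre.length Ag.length a) rest']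
    have h := ih (pre ++ [stepValueA current pre.length Ag.length a])
    rw [List.length_append, List.length_cons, List.length_nil, Nat.zero_add] at h
    rw [h]
    simp [List.append_assoc]

lemma outer_fold (current : List (List (Option String)))
    (Ag rest : List (List (Option String))) :
    (rest.zipIdx Ag.length).foldl
        (fun nr p => p.1.zipIdx.foldl (fun nr2 q => stepCellA current nr2 p.2 q.2 q.1) nr)
        (Ag ++ rest)
      = Ag ++ (rest.zipIdx Ag.length).map
          (fun p => p.1.zipIdx.map (fun q => stepValueA current q.2 p.2 q.1)) := by
  induction rest generalizing Ag with
  | nil => simp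
  | cons row rest' ih =>
    rw [List.zipIdx_cons, List.foldl_cons, List.map_cons]
    have hin := inner_fold current Ag rest' row []
    simp only [List.nil_append, List.length_nil] at hin
    rw [hin]
    rw [List.append_cons Ag _ rest']
    have h := ih (Ag ++ [row.zipIdx.map fun q => stepValueA current q.2 Ag.length q.1])
    rw [List.length_append, List.length_cons, List.length_nil, Nat.zero_add] at h
    rw [h]
    simp [List.append_assoc]

lemma pass_eq (g : List (List (Option String))) : passA g = passB g := by
  unfold passA passB cloneRowsA
  rw [List.map_id']
  have h := outer_fold g [] g
  simp only [List.nil_append, List.length_nil] at h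
  rw [h]
  apply List.map_congr_left
  intro p hp
  apply List.map_congr_left
  intro q hq
  obtain ⟨p1, p2⟩ := p
  obtain ⟨q1, q2⟩ := q
  obtain ⟨h1, h2, h3⟩ := List.mem_zipIdx hp
  obtain ⟨h1', h2', h3'⟩ := List.mem_zipIdx hq
  simp only [Nat.zero_add, Nat.sub_zero] at h2 h3 h2' h3'
  have hrow : g.getD p2 [] = p1 := by
    rw [List.getD_eq_getElem _ _ h2, h3]
  rw [cell_eq]
  · exact h2
  · rw [hrow]; omega

-- ===== VERDICT =====
theorem op_smooth_spec : Claim_equal_op_smooth := by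
  have fold_pass : ∀ (l : List Nat) (g : List (List (Option String))),
      l.foldl (fun c _ => passA c) g = l.foldl (fun c _ => passB c) g := by
    intro l
    induction l with
    | nil => intro g; rfl
    | cons a t ih => intro g; rw [List.foldl_cons, List.foldl_cons, pass_eq]; exact ih _
  intro rows passes _
  show op_smooth rows passes = op_smooth_alt rows passes
  simp only [op_smooth, op_smooth_alt, cloneRowsA]
  exact fold_pass _ _
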